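-- pv_equiv track=rewrite | github.com/xianjiu-001/-InterviewAlgorithm | 01子串.py | func
-- ===== SOURCE A (Python) =====
-- def func(s):
--     if len(s) == 0:
--         return 0
--     elif len(s) == 1:
--         return 1
--     else:
--         count = 1
--         pre = s[0]
--         for i in s:
--             if i != pre:
--                 pre = i
--                 count += 1
--         return count
-- ===== SOURCE B (Python) =====
-- def func(s):
--     # divide and conquer: runs(s) = runs(left) + runs(right),
--     # minus 1 when the run spanning the cut was counted twice
--     if len(s) == 0:
--         return 0
--     if len(s) == 1:
--         return 1
--     m = len(s) // 2
--     left, right = s[:m], s[m:]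
--     return func(left) + func(right) - (1 if left[-1] == right[0] else 0)
-- ===== Notes on version B (the rewrite author's own statement) =====
-- stated objective: alternative
-- what changed: Replaces A's single left-to-right pass with a previous-character/counter accumulator by a divide-and-conquer recursion that splits the string in half, counts runs in each half independently, and merges by subtracting one when the run spanning the cut was counted twice.
import Mathlib
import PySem

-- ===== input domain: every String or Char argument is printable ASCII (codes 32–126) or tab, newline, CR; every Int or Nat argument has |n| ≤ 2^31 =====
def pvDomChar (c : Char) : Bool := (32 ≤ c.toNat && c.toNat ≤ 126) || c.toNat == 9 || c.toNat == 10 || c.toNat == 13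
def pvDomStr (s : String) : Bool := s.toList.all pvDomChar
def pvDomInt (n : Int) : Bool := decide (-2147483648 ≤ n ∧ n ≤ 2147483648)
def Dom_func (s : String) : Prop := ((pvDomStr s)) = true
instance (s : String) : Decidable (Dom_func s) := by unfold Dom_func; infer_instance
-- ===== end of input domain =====

-- B counts runs by divide and conquer on string halves instead of A's previous-char/counter pass; same values, alternative decomposition.

-- ===== PORT A =====
-- A: guards for length 0 and 1, else fold over all characters carrying (count, pre).
def func (s : String) : Int :=
  if s.toList.length = 0 then 0
  else if s.toList.length = 1 then 1
  else
    (s.toList.foldl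
      (fun (st : Int × Char) i => if i ≠ st.2 then (st.1 + 1, i) else st)
      (1, s.toList.headD ' ')).1

-- ===== PORT B =====
-- B: split at m = len//2, recurse on both halves, subtract 1 if the cut splits a run.
-- left[-1] / right[0] are exact as getLastD / headD here since both halves are nonempty.
def pvHalves (l : List Char) : Int :=
  if l.length = 0 then 0
  else if l.length = 1 then 1
  else
    let m := l.length / 2
    pvHalves (l.take m) + pvHalves (l.drop m) -
      (if (l.take m).getLastD ' ' = (l.drop m).headD ' ' then 1 else 0)
termination_by l.length
decreasing_by
  · simp only [List.length_take]; omega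
  · simp only [List.length_drop]; omega

def func_alt (s : String) : Int := pvHalves s.toList

-- ===== PRECONDITION & SPEC =====
def Spec_func (s : String) (out : Int) : Prop := out = func_alt s
instance (s : String) (out : Int) : Decidable (Spec_func s out) := by unfold Spec_func; infer_instance

-- ===== CLAIM (what is proved, stated in full; the proofs are below) =====
def Claim_equal_func : Prop := ∀ (s : String), Dom_func s → Spec_func s (func s)

-- ===== LEMMAS AND PROOFS =====

-- number of adjacent unequal pairs
def pvAdj : List Char → Int
  | [] => 0
  | [_] => 0
  | x :: y :: t => (if x ≠ y then 1 else 0) + pvAdj (y :: t)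

-- changes seen by A's loop starting with previous char p
def pvChanges (p : Char) : List Char → Int
  | [] => 0
  | x :: xs => if x ≠ p then 1 + pvChanges x xs else pvChanges p xs

theorem pvFoldl_changes (l : List Char) (n : Int) (p : Char) :
    (l.foldl (fun (st : Int × Char) i => if i ≠ st.2 then (st.1 + 1, i) else st) (n, p)).1
      = n + pvChanges p l := by
  induction l generalizing n p with
  | nil => simp [pvChanges]
  | cons x xs ih =>
    by_cases h : x = p
    · have hstep : (if x ≠ ((n, p) : Int × Char).2 then (((n, p) : Int × Char).1 + 1, x)
          else ((n, p) : Int × Char)) = ((n, p) : Int × Char) := by simp [h]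
      rw [List.foldl_cons, hstep, ih, pvChanges]
      simp [h]
    · have hstep : (if x ≠ ((n, p) : Int × Char).2 then (((n, p) : Int × Char).1 + 1, x)
          else ((n, p) : Int × Char)) = ((n + 1, x) : Int × Char) := by simp [h]
      rw [List.foldl_cons, hstep, ih, pvChanges]
      simp [h]; ring

theorem pvChanges_adj (l : List Char) (p : Char) :
    pvChanges p l = pvAdj (p :: l) := by
  induction l generalizing p with
  | nil => simp [pvChanges, pvAdj]
  | cons x xs ih =>
    by_cases h : x = p
    · subst h
      rw [pvChanges, if_neg (by simp), ih, pvAdj]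
      simp
    · rw [pvChanges, if_pos h, ih, pvAdj, if_pos (fun he => h he.symm)]

theorem pvAdj_append (a b : List Char) (ha : a ≠ []) (hb : b ≠ []) :
    pvAdj (a ++ b) = pvAdj a + pvAdj b +
      (if a.getLastD ' ' = b.headD ' ' then 0 else 1) := by
  induction a with
  | nil => exact absurd rfl ha
  | cons x a' ih =>
    cases a' with
    | nil =>
      cases b with
      | nil => exact absurd rfl hb
      | cons y t =>
        have hx : ([x] : List Char).getLastD ' ' = x := rfl
        simp only [List.singleton_append, pvAdj, ite_not, List.headD_cons, hx]
        ring
    | cons x' a'' =>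
      have hih := ih (by simp)
      have hlast : (x :: x' :: a'').getLastD ' ' = (x' :: a'').getLastD ' ' := by
        simp [List.getLastD_eq_getLast?, List.getLast?_cons_cons]
      simp only [List.cons_append, pvAdj, ite_not] at hih ⊢
      rw [hih, hlast]
      ring

theorem pvHalves_adj : ∀ (l : List Char), l ≠ [] → pvHalves l = 1 + pvAdj l := by
  intro l
  induction l using pvHalves.induct with
  | case1 l h => intro hne; exact absurd (List.length_eq_zero_iff.mp h) hne
  | case2 l h0 h1 =>
    intro _
    obtain ⟨a, rfl⟩ := List.length_eq_one_iff.mp h1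
    simp [pvHalves, pvAdj]
  | case3 l h0 h1 m iht ihd =>
    intro _
    have hm : m = l.length / 2 := rfl
    have hlen : 2 ≤ l.length := by omega
    have hm1 : 1 ≤ m := by omega
    have hmlt : m < l.length := by omega
    have htne : l.take m ≠ [] :=
      List.ne_nil_of_length_pos (by rw [List.length_take]; omega)
    have hdne : l.drop m ≠ [] :=
      List.ne_nil_of_length_pos (by rw [List.length_drop]; omega)
    have hsplit : l.take m ++ l.drop m = l := List.take_append_drop m l
    rw [pvHalves, if_neg h0, if_neg h1]
    show pvHalves (l.take m) + pvHalves (l.drop m) -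
        (if (l.take m).getLastD ' ' = (l.drop m).headD ' ' then 1 else 0) = 1 + pvAdj l
    rw [iht htne, ihd hdne]
    conv_rhs => rw [← hsplit]
    rw [pvAdj_append _ _ htne hdne]
    split_ifs <;> ring

-- ===== VERDICT (by name: the statement is the Claim_ definition above) =====
theorem func_spec : Claim_equal_func := by
  intro s _
  unfold Spec_func func func_alt
  cases hl : s.toList with
  | nil => simp [pvHalves]
  | cons c rest =>
    cases rest with
    | nil => simp [pvHalves]
    | cons d ds =>
      simp only [List.length_cons]
      rw [if_neg (by omega), if_neg (by omega)]
      simp only [List.headD_cons]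
      rw [pvFoldl_changes, pvChanges_adj,
          pvHalves_adj _ (by simp)]
      simp [pvAdj]
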